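-- pv_equiv track=rewrite | github.com/FAnzTvDev/ATLAS_CONTROL_SYSTEM | tools/beat_enrichment.py | extract_eye_line
-- ===== SOURCE A (Python) =====
-- EYE_LINE_RULES = {
--     # Object interactions → eyes on object
--     "letter": "down at letter in hands, reading",
--     "book": "scanning book spines at eye level",
--     "photograph": "through camera viewfinder, scanning scene",
--     "camera": "through camera viewfinder, framing shot",
--     "note": "down at paper in hands",
--     "manuscript": "down at manuscript, studying text",
--     "painting": "up at painting on wall",
--     "window": "toward window, gazing out",
--     "door": "toward door, alert",
--     "shelf": "scanning across shelves",
--     "desk": "down at desk surface",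
--     "mirror": "at own reflection",
--     "phone": "down at phone screen",
--
--     # Movement verbs → tracking direction
--     "enters": "forward, taking in new space",
--     "walks": "ahead, direction of movement",
--     "turns": "rotating to new focus point",
--     "looks toward": "toward mentioned target",
--     "glances": "quick shift to target",
--     "stares": "fixed, unblinking, at target",
-- }
--
-- def extract_eye_line(character_action: str, dialogue: str = "", atmosphere: str = "") -> str:
--     """Derive eye-line target from beat's character_action text."""
--     text = ((character_action or "") + " " + (dialogue or "")).lower()
--
--     # Check specific object targets first (most specific wins)
--     for keyword, eye_line in sorted(EYE_LINE_RULES.items(), key=lambda x: len(x[0]), reverse=True):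
--         if keyword in text:
--             return eye_line
--
--     # Fallback based on atmosphere
--     atmo = (atmosphere or "").lower()
--     if "discovery" in atmo or "tension" in atmo:
--         return "alert, scanning for source of tension"
--     if "warm" in atmo or "reverence" in atmo:
--         return "soft gaze, taking in surroundings with appreciation"
--
--     return "neutral, present in scene"
-- ===== SOURCE B (Python) =====
-- EYE_LINE_RULES = {
--     # Object interactions → eyes on object
--     "letter": "down at letter in hands, reading",
--     "book": "scanning book spines at eye level",
--     "photograph": "through camera viewfinder, scanning scene",
--     "camera": "through camera viewfinder, framing shot",
--     "note": "down at paper in hands",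
--     "manuscript": "down at manuscript, studying text",
--     "painting": "up at painting on wall",
--     "window": "toward window, gazing out",
--     "door": "toward door, alert",
--     "shelf": "scanning across shelves",
--     "desk": "down at desk surface",
--     "mirror": "at own reflection",
--     "phone": "down at phone screen",
--
--     # Movement verbs → tracking direction
--     "enters": "forward, taking in new space",
--     "walks": "ahead, direction of movement",
--     "turns": "rotating to new focus point",
--     "looks toward": "toward mentioned target",
--     "glances": "quick shift to target",
--     "stares": "fixed, unblinking, at target",
-- }
--
--
-- def _atmosphere_fallback(atmosphere: str) -> str:
--     """Eye line chosen from atmosphere when no keyword matched."""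
--     atmo = (atmosphere or "").lower()
--     if "discovery" in atmo or "tension" in atmo:
--         return "alert, scanning for source of tension"
--     if "warm" in atmo or "reverence" in atmo:
--         return "soft gaze, taking in surroundings with appreciation"
--     return "neutral, present in scene"
--
--
-- def extract_eye_line(character_action: str, dialogue: str = "", atmosphere: str = "") -> str:
--     """Derive eye-line target from beat's character_action text.
--
--     One pass, no sort: pick the longest matching keyword directly; among
--     equal-length matches the first-inserted rule wins (max keeps the first
--     maximal item), matching the stable descending sort of the original.
--     """
--     text = ((character_action or "") + " " + (dialogue or "")).lower()
--     best = max((item for item in EYE_LINE_RULES.items() if item[0] in text),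
--                key=lambda item: len(item[0]), default=None)
--     if best is not None:
--         return best[1]
--     return _atmosphere_fallback(atmosphere)
-- ===== Notes on version B (the rewrite author's own statement) =====
-- stated objective: simpler
-- what changed: B drops A's per-call descending sort of the rule table and instead selects the longest matching keyword in one max-by-length pass over the insertion-ordered rules (ties resolved to the first-inserted rule, as A's stable sort does), with the atmosphere fallback factored into a helper.
import Mathlib
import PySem

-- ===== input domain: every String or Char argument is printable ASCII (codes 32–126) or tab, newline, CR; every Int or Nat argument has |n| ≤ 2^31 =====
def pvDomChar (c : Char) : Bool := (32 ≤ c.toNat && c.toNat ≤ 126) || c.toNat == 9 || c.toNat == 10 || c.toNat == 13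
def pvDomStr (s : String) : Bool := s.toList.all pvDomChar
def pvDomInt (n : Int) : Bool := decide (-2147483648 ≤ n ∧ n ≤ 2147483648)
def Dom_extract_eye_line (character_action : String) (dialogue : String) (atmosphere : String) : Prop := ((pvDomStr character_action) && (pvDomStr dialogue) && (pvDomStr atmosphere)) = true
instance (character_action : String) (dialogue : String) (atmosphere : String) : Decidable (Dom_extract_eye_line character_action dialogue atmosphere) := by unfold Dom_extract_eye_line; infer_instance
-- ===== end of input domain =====

-- B replaces A's per-call descending sort of the rule table by a single max-by-length pass
-- over the insertion-ordered rules (objective: simpler, no sort per call).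

-- ===== PORT A =====
-- module constant EYE_LINE_RULES, a dict ported as an association list in insertion order
def eyeLineRules : List (String × String) :=
  [("letter", "down at letter in hands, reading"),
   ("book", "scanning book spines at eye level"),
   ("photograph", "through camera viewfinder, scanning scene"),
   ("camera", "through camera viewfinder, framing shot"),
   ("note", "down at paper in hands"),
   ("manuscript", "down at manuscript, studying text"),
   ("painting", "up at painting on wall"),
   ("window", "toward window, gazing out"),
   ("door", "toward door, alert"),
   ("shelf", "scanning across shelves"),
   ("desk", "down at desk surface"),
   ("mirror", "at own reflection"),
   ("phone", "down at phone screen"),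
   ("enters", "forward, taking in new space"),
   ("walks", "ahead, direction of movement"),
   ("turns", "rotating to new focus point"),
   ("looks toward", "toward mentioned target"),
   ("glances", "quick shift to target"),
   ("stares", "fixed, unblinking, at target")]

-- A's for-loop: first (keyword, eye_line) of the sorted items whose keyword is in text
def eyeScanSorted : List (String × String) → List Char → Option String
  | [], _ => none
  | (keyword, eye_line) :: rest, text =>
      if PySem.Chars.isIn keyword.toList text then some eye_line else eyeScanSorted rest text

-- (s or "") is s for every str s, so text = (character_action + " " + dialogue).lower()
def extract_eye_line (character_action : String) (dialogue : String) (atmosphere : String) : String :=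
  let text := PySem.Chars.lower (character_action.toList ++ " ".toList ++ dialogue.toList)
  match eyeScanSorted
      (PySem.List.sorted eyeLineRules (fun x => PySem.Chars.len x.1.toList) true) text with
  | some eye_line => eye_line
  | none =>
      let atmo := PySem.Chars.lower atmosphere.toList
      if PySem.Chars.isIn "discovery".toList atmo || PySem.Chars.isIn "tension".toList atmo then
        "alert, scanning for source of tension"
      else if PySem.Chars.isIn "warm".toList atmo || PySem.Chars.isIn "reverence".toList atmo then
        "soft gaze, taking in surroundings with appreciation"
      else
        "neutral, present in scene"

-- ===== PORT B =====
-- Source B's helper _atmosphere_fallback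
def atmosphereFallback (atmosphere : String) : String :=
  let atmo := PySem.Chars.lower atmosphere.toList
  if PySem.Chars.isIn "discovery".toList atmo || PySem.Chars.isIn "tension".toList atmo then
    "alert, scanning for source of tension"
  else if PySem.Chars.isIn "warm".toList atmo || PySem.Chars.isIn "reverence".toList atmo then
    "soft gaze, taking in surroundings with appreciation"
  else
    "neutral, present in scene"

-- best = max((item for item in EYE_LINE_RULES.items() if item[0] in text), key=len∘fst, default=None)
def extract_eye_line_alt (character_action : String) (dialogue : String) (atmosphere : String) : String :=
  let text := PySem.Chars.lower (character_action.toList ++ " ".toList ++ dialogue.toList)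
  match PySem.List.max?
      (eyeLineRules.filter (fun item => PySem.Chars.isIn item.1.toList text))
      (fun item => PySem.Chars.len item.1.toList) with
  | some best => best.2
  | none => atmosphereFallback atmosphere

-- ===== PRECONDITION & SPEC =====
def Spec_extract_eye_line (character_action : String) (dialogue : String) (atmosphere : String) (out : String) : Prop := out = extract_eye_line_alt character_action dialogue atmosphere
instance (character_action : String) (dialogue : String) (atmosphere : String) (out : String) : Decidable (Spec_extract_eye_line character_action dialogue atmosphere out) := by unfold Spec_extract_eye_line; infer_instance

-- ===== CLAIM (what is proved, stated in full; the proofs are below) =====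
def Claim_equal_extract_eye_line : Prop := ∀ (character_action : String) (dialogue : String) (atmosphere : String), Dom_extract_eye_line character_action dialogue atmosphere → Spec_extract_eye_line character_action dialogue atmosphere (extract_eye_line character_action dialogue atmosphere)

-- ===== LEMMAS AND PROOFS =====

-- Python max's fold step: keep the current element unless the new key is strictly larger
def maxStep {α κ : Type} [LinearOrder κ] (key : α → κ) (acc : Option α) (x : α) : Option α :=
  match acc with
  | none => some x
  | some m => if key m < key x then some x else some m

-- stable insertion (later element goes after equal keys) preserves the descending order
lemma pairwise_insertBy {α κ : Type} [LinearOrder κ] (key : α → κ) (x : α) (L : List α)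
    (h : L.Pairwise (fun a b => key b ≤ key a)) :
    (PySem.List.insertBy (fun a b => decide (key b < key a)) x L).Pairwise
      (fun a b => key b ≤ key a) := by
  induction L with
  | nil => simp [PySem.List.insertBy]
  | cons y ys ih =>
    rcases List.pairwise_cons.mp h with ⟨hy, hys⟩
    simp only [PySem.List.insertBy]
    split
    · rename_i hlt
      refine List.pairwise_cons.mpr ⟨?_, h⟩
      intro z hz
      rcases List.mem_cons.mp hz with rfl | hz
      · exact le_of_lt (by simpa using hlt)
      · exact le_trans (hy z hz) (le_of_lt (by simpa using hlt))
    · rename_i hnlt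
      refine List.pairwise_cons.mpr ⟨?_, ih hys⟩
      intro z hz
      rcases (PySem.List.mem_insertBy _ x z ys).mp hz with rfl | hz
      · exact le_of_not_gt (by simpa using hnlt)
      · exact hy z hz

-- find? over a stable insertion into a descending list = one max step over find? of the list
lemma find?_insertBy {α κ : Type} [LinearOrder κ] (key : α → κ) (p : α → Bool) (x : α) (L : List α)
    (h : L.Pairwise (fun a b => key b ≤ key a)) :
    (PySem.List.insertBy (fun a b => decide (key b < key a)) x L).find? p
      = if p x then maxStep key (L.find? p) x else L.find? p := by
  induction L with
  | nil =>
    simp only [PySem.List.insertBy, List.find?]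
    cases hpx : p x <;> simp [maxStep]
  | cons y ys ih =>
    rcases List.pairwise_cons.mp h with ⟨hy, hys⟩
    simp only [PySem.List.insertBy]
    split
    · rename_i hlt
      have hlt' : key y < key x := by simpa using hlt
      cases hpx : p x with
      | false => simp [List.find?, hpx]
      | true =>
        cases hfind : List.find? p (y :: ys) with
        | none => simp [List.find?, hpx, maxStep] at *
        | some m =>
          have hm : m ∈ y :: ys := List.mem_of_find?_eq_some hfind
          have hkm : key m ≤ key y := by
            rcases List.mem_cons.mp hm with rfl | hm
            · exact le_refl _
            · exact hy m hm
          simp [List.find?, hpx, maxStep, lt_of_le_of_lt hkm hlt']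
    · rename_i hnlt
      have hnlt' : ¬ key y < key x := by simpa using hnlt
      cases hpy : p y with
      | true =>
        cases hpx : p x with
        | false => simp [List.find?, hpy]
        | true => simp [List.find?, hpy, maxStep, hnlt']
      | false =>
        have : List.find? p (y :: PySem.List.insertBy
            (fun a b => decide (key b < key a)) x ys) =
            List.find? p (PySem.List.insertBy (fun a b => decide (key b < key a)) x ys) := by
          simp [List.find?, hpy]
        rw [this, ih hys]
        simp [List.find?, hpy]

-- the whole insertion sort at once: first match of the sorted list = fold of max steps
lemma find?_foldl_insertBy {α κ : Type} [LinearOrder κ] (key : α → κ) (p : α → Bool) (xs : List α)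
    (L : List α) (h : L.Pairwise (fun a b => key b ≤ key a)) :
    ((xs.foldl (fun acc x =>
        PySem.List.insertBy (fun a b => decide (key b < key a)) x acc) L).find? p)
      = xs.foldl (fun acc x => if p x then maxStep key acc x else acc) (L.find? p) := by
  induction xs generalizing L with
  | nil => rfl
  | cons x xs ih =>
    simp only [List.foldl_cons]
    rw [ih _ (pairwise_insertBy key x L h), find?_insertBy key p x L h]

-- max? over the filtered list is the same fold of max steps over the original list
lemma max?_filter_eq_foldl {α κ : Type} [LinearOrder κ] (key : α → κ) (p : α → Bool) (xs : List α) :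
    PySem.List.max? (xs.filter p) key
      = xs.foldl (fun acc x => if p x then maxStep key acc x else acc) none := by
  show (xs.filter p).foldl _ none = _
  rw [List.foldl_filter]
  rfl

-- A's scan loop is find? followed by taking the value
lemma eyeScanSorted_eq_find? (L : List (String × String)) (text : List Char) :
    eyeScanSorted L text
      = (L.find? (fun x => PySem.Chars.isIn x.1.toList text)).map Prod.snd := by
  induction L with
  | nil => rfl
  | cons y ys ih =>
    obtain ⟨kw, line⟩ := y
    simp only [eyeScanSorted, List.find?]
    cases hin : PySem.Chars.isIn kw.toList text <;> simp [ih]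

-- ===== VERDICT (by name: the statement is the Claim_ definition above) =====
theorem extract_eye_line_spec : Claim_equal_extract_eye_line := by
  intro character_action dialogue atmosphere _
  unfold Spec_extract_eye_line extract_eye_line extract_eye_line_alt
  simp only [eyeScanSorted_eq_find?, PySem.List.sorted_rev_eq_foldl_insertBy,
    find?_foldl_insertBy (fun x => PySem.Chars.len x.1.toList) _ eyeLineRules [] List.Pairwise.nil,
    max?_filter_eq_foldl, List.find?_nil]
  cases List.foldl
      (fun acc x =>
        if PySem.Chars.isIn x.1.toList
            (PySem.Chars.lower (character_action.toList ++ " ".toList ++ dialogue.toList)) then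
          maxStep (fun x => PySem.Chars.len x.1.toList) acc x
        else acc)
      none eyeLineRules with
  | none => simp [atmosphereFallback]
  | some best => rfl
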